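-- pv_equiv track=rewrite | github.com/pypi-data/pypi-mirror-253 | packages/ErrorType/ErrorType-0.1.3-py3-none-any.whl/ErrorType/error_type.py | judge_error
-- ===== SOURCE A (Python) =====
-- def judge_error(temp_data_time):#錯誤判斷
--     if ('13' in [y.split('-')[0] for y in [z for z in temp_data_time['errortype']]]):
--         return 'quit undercharge'
--     elif ('2_noResponse' in [x for x in temp_data_time['errortype']]):
--         return 'entry fail'
--     elif ('4_noResponse' in [x for x in temp_data_time['errortype']]):
--         return 'prg.check fail'
--     elif ('1' in [y.split('-')[0] for y in [z for z in temp_data_time['errortype']]]):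
--         return 'check ID fail'
--     elif ('4' in [x for x in temp_data_time['errortype']]):
--         return 'prg.check fail'
--     elif ('2' in [y.split('-')[0] for y in [z for z in temp_data_time['errortype']]]):
--         return 'entry fail'
-- ===== SOURCE B (Python) =====
-- _MSGS = ['quit undercharge', 'entry fail', 'prg.check fail',
--          'check ID fail', 'prg.check fail', 'entry fail', None]
--
-- def _rank(el):
--     # priority rank of a single element (0 = highest priority, 6 = no match)
--     pre = el.split('-')[0]
--     if pre == '13':
--         return 0
--     if el == '2_noResponse':
--         return 1
--     if el == '4_noResponse':
--         return 2
--     if pre == '1':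
--         return 3
--     if el == '4':
--         return 4
--     if pre == '2':
--         return 5
--     return 6
--
-- def judge_error(temp_data_time):
--     # classify each element once, aggregate with min, then table-lookup the message
--     best = 6
--     for el in temp_data_time['errortype']:
--         r = _rank(el)
--         if r < best:
--             best = r
--     return _MSGS[best]
-- ===== Notes on version B (the rewrite author's own statement) =====
-- stated objective: alternative
-- what changed: A runs six whole-list scans (rebuilding and re-splitting the list per branch); B classifies each element once into a priority rank (0-6), takes the minimum rank in a single fold, and looks the message up in a table.
import Mathlib
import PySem

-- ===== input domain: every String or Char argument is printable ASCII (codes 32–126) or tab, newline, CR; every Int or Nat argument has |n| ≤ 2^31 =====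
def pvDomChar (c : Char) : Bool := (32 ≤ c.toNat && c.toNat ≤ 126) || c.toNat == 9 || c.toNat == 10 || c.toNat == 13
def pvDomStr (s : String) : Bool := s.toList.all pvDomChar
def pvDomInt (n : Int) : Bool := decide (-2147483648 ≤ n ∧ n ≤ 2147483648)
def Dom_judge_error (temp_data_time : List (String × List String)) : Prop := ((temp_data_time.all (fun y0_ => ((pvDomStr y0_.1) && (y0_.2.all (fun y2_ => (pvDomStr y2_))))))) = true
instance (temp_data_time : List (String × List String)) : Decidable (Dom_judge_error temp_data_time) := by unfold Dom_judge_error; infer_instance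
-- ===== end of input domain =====

-- B replaces A's six whole-list scans by classifying each element once into a priority
-- rank, folding with min, and a table lookup (objective: alternative decomposition).

-- y.split('-')[0]; split with a nonempty separator always yields a nonempty list, so headD's default is never used
def pvPrefix (y : String) : String := ((PySem.Str.split? y "-").getD []).headD ""

-- ===== PORT A =====
def judge_error (temp_data_time : List (String × List String)) : Option String :=
  match temp_data_time.find? (fun p => p.1 == "errortype") with
  | none => none  -- KeyError in Python; excluded by Pre_judge_error
  | some (_, et) =>
    if ((et.map (fun z => z)).map (fun y => pvPrefix y)).contains "13" then some "quit undercharge"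
    else if (et.map (fun x => x)).contains "2_noResponse" then some "entry fail"
    else if (et.map (fun x => x)).contains "4_noResponse" then some "prg.check fail"
    else if ((et.map (fun z => z)).map (fun y => pvPrefix y)).contains "1" then some "check ID fail"
    else if (et.map (fun x => x)).contains "4" then some "prg.check fail"
    else if ((et.map (fun z => z)).map (fun y => pvPrefix y)).contains "2" then some "entry fail"
    else none

-- ===== PORT B =====
-- the _MSGS table of Source B (Python list of str-or-None → List (Option String))
def pvMsgs : List (Option String) :=
  [some "quit undercharge", some "entry fail", some "prg.check fail",
   some "check ID fail", some "prg.check fail", some "entry fail", none]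

-- Source B's _rank helper (pre = el.split('-')[0] is pvPrefix el, inlined)
def pvRank (el : String) : Nat :=
  if pvPrefix el = "13" then 0
  else if el = "2_noResponse" then 1
  else if el = "4_noResponse" then 2
  else if pvPrefix el = "1" then 3
  else if el = "4" then 4
  else if pvPrefix el = "2" then 5
  else 6

def judge_error_alt (temp_data_time : List (String × List String)) : Option String :=
  match temp_data_time.find? (fun p => p.1 == "errortype") with
  | none => none  -- KeyError in Python; excluded by Pre_judge_error
  | some (_, et) =>
    let best := et.foldl (fun b el => if pvRank el < b then pvRank el else b) 6
    -- _MSGS[best]: best ≤ 6 always (rank ∈ 0..6), so Python indexing never raises; exact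
    pvMsgs.getD best none

-- ===== PRECONDITION & SPEC =====
-- Pre_ excludes exactly the inputs with no 'errortype' key, where Python A raises KeyError.
def Pre_judge_error (temp_data_time : List (String × List String)) : Prop :=
  "errortype" ∈ temp_data_time.map Prod.fst
instance (temp_data_time : List (String × List String)) : Decidable (Pre_judge_error temp_data_time) := by unfold Pre_judge_error; infer_instance
def pvWitness_judge_error : (List (String × List String)) := [("errortype", ["13-a", "2"])]
def Spec_judge_error (temp_data_time : List (String × List String)) (out : Option String) : Prop := out = judge_error_alt temp_data_time
instance (temp_data_time : List (String × List String)) (out : Option String) : Decidable (Spec_judge_error temp_data_time out) := by unfold Spec_judge_error; infer_instance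

-- ===== CLAIM (what is proved, stated in full; the proofs are below) =====
def Claim_equal_judge_error : Prop := ∀ (temp_data_time : List (String × List String)), Dom_judge_error temp_data_time → Pre_judge_error temp_data_time → Spec_judge_error temp_data_time (judge_error temp_data_time)

-- ===== LEMMAS AND PROOFS =====

-- the min-fold of B, named for the lemmas
def pvBest (et : List String) (a : Nat) : Nat :=
  et.foldl (fun b el => if pvRank el < b then pvRank el else b) a

theorem pvBest_le_acc (et : List String) (a : Nat) : pvBest et a ≤ a := by
  induction et generalizing a with
  | nil => simp [pvBest]
  | cons x xs ih =>
    simp only [pvBest, List.foldl_cons]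
    split
    · exact le_trans (ih _) (by omega)
    · exact ih _

theorem pvBest_le_mem (et : List String) (a : Nat) (el : String) (h : el ∈ et) :
    pvBest et a ≤ pvRank el := by
  induction et generalizing a with
  | nil => cases h
  | cons x xs ih =>
    rcases List.mem_cons.mp h with rfl | h'
    · simp only [pvBest, List.foldl_cons]
      split
      · exact le_trans (pvBest_le_acc xs _) (le_refl _)
      · exact le_trans (pvBest_le_acc xs _) (by omega)
    · exact ih _ h'

theorem pvBest_attained (et : List String) (a : Nat) :
    pvBest et a = a ∨ ∃ el ∈ et, pvBest et a = pvRank el := by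
  induction et generalizing a with
  | nil => left; simp [pvBest]
  | cons x xs ih =>
    simp only [pvBest, List.foldl_cons]
    split
    · rcases ih (pvRank x) with h | ⟨el, hel, h⟩
      · right; exact ⟨x, List.mem_cons_self, h⟩
      · right; exact ⟨el, List.mem_cons_of_mem _ hel, h⟩
    · rcases ih a with h | ⟨el, hel, h⟩
      · left; exact h
      · right; exact ⟨el, List.mem_cons_of_mem _ hel, h⟩

-- each of A's six conditions holds for an element iff its rank is exactly that level
theorem pvRank_eq0 (el : String) : pvPrefix el = "13" ↔ pvRank el = 0 := by
  unfold pvRank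
  constructor
  · intro h; rw [if_pos h]
  · split_ifs <;> simp_all
theorem pvRank_eq1 (el : String) : el = "2_noResponse" ↔ pvRank el = 1 := by
  unfold pvRank
  constructor
  · rintro rfl; decide
  · split_ifs <;> simp_all
theorem pvRank_eq2 (el : String) : el = "4_noResponse" ↔ pvRank el = 2 := by
  unfold pvRank
  constructor
  · rintro rfl; decide
  · split_ifs <;> simp_all
theorem pvRank_eq3 (el : String) : pvPrefix el = "1" ↔ pvRank el = 3 := by
  unfold pvRank
  constructor
  · intro h
    rw [if_neg (by simp [h]), if_neg, if_neg, if_pos h]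
    · rintro rfl; exact absurd h (by decide)
    · rintro rfl; exact absurd h (by decide)
  · split_ifs <;> simp_all
theorem pvRank_eq4 (el : String) : el = "4" ↔ pvRank el = 4 := by
  unfold pvRank
  constructor
  · rintro rfl; decide
  · split_ifs <;> simp_all
theorem pvRank_eq5 (el : String) : pvPrefix el = "2" ↔ pvRank el = 5 := by
  unfold pvRank
  constructor
  · intro h
    rw [if_neg (by simp [h]), if_neg, if_neg, if_neg (by simp [h]), if_neg, if_pos h]
    · rintro rfl; exact absurd h (by decide)
    · rintro rfl; exact absurd h (by decide)
    · rintro rfl; exact absurd h (by decide)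
  · split_ifs <;> simp_all

-- A's contains-tests, rewritten as "some element has rank exactly k"
theorem contains_prefix_iff (et : List String) (s : String) :
    (et.map pvPrefix).contains s = true ↔ ∃ el ∈ et, pvPrefix el = s := by
  simp [eq_comm]
theorem contains_raw_iff (et : List String) (s : String) :
    et.contains s = true ↔ ∃ el ∈ et, el = s := by
  simp [eq_comm]

-- ===== VERDICT (by name: the statement is the Claim_ definition above) =====
theorem judge_error_spec : Claim_equal_judge_error := by
  intro t _ _
  unfold Spec_judge_error judge_error judge_error_alt
  cases h : t.find? (fun p => p.1 == "errortype") with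
  | none => rfl
  | some pr =>
    obtain ⟨k, et⟩ := pr
    simp only [List.map_id']
    show _ = pvMsgs.getD (pvBest et 6) none
    have hle : ∀ el ∈ et, pvBest et 6 ≤ pvRank el := pvBest_le_mem et 6
    have hle6 : pvBest et 6 ≤ 6 := pvBest_le_acc et 6
    have hatt := pvBest_attained et 6
    by_cases c0 : ∃ el ∈ et, pvRank el = 0
    · have hm : pvBest et 6 = 0 := by
        obtain ⟨el, hel, hr⟩ := c0
        have h1 := hle el hel
        rcases hatt with h6 | ⟨w, hw, hwr⟩
        · omega
        · omega
      rw [if_pos (by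
          obtain ⟨el, hel, hr⟩ := c0
          exact (contains_prefix_iff et _).mpr ⟨el, hel, (pvRank_eq0 el).mpr hr⟩)]
      rw [hm]
      rfl
    by_cases c1 : ∃ el ∈ et, pvRank el = 1
    · have hm : pvBest et 6 = 1 := by
        obtain ⟨el, hel, hr⟩ := c1
        have h1 := hle el hel
        rcases hatt with h6 | ⟨w, hw, hwr⟩
        · omega
        · have hw6 : pvBest et 6 = pvRank w := hwr
          rcases Nat.lt_or_ge (pvRank w) 1 with hc | hc
          · interval_cases hr2 : (pvRank w)
            · exact absurd ⟨w, hw, hr2⟩ c0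
          · omega
      rw [if_neg (fun hc => c0 (by simpa [contains_prefix_iff, pvRank_eq0] using hc))]
      rw [if_pos (by
          obtain ⟨el, hel, hr⟩ := c1
          exact (contains_raw_iff et _).mpr ⟨el, hel, (pvRank_eq1 el).mpr hr⟩)]
      rw [hm]
      rfl
    by_cases c2 : ∃ el ∈ et, pvRank el = 2
    · have hm : pvBest et 6 = 2 := by
        obtain ⟨el, hel, hr⟩ := c2
        have h1 := hle el hel
        rcases hatt with h6 | ⟨w, hw, hwr⟩
        · omega
        · have hw6 : pvBest et 6 = pvRank w := hwr
          rcases Nat.lt_or_ge (pvRank w) 2 with hc | hc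
          · interval_cases hr2 : (pvRank w)
            · exact absurd ⟨w, hw, hr2⟩ c0
            · exact absurd ⟨w, hw, hr2⟩ c1
          · omega
      rw [if_neg (fun hc => c0 (by simpa [contains_prefix_iff, pvRank_eq0] using hc))]
      rw [if_neg (fun hc => c1 ⟨"2_noResponse", by simpa using hc, (pvRank_eq1 _).mp rfl⟩)]
      rw [if_pos (by
          obtain ⟨el, hel, hr⟩ := c2
          exact (contains_raw_iff et _).mpr ⟨el, hel, (pvRank_eq2 el).mpr hr⟩)]
      rw [hm]
      rfl
    by_cases c3 : ∃ el ∈ et, pvRank el = 3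
    · have hm : pvBest et 6 = 3 := by
        obtain ⟨el, hel, hr⟩ := c3
        have h1 := hle el hel
        rcases hatt with h6 | ⟨w, hw, hwr⟩
        · omega
        · have hw6 : pvBest et 6 = pvRank w := hwr
          rcases Nat.lt_or_ge (pvRank w) 3 with hc | hc
          · interval_cases hr2 : (pvRank w)
            · exact absurd ⟨w, hw, hr2⟩ c0
            · exact absurd ⟨w, hw, hr2⟩ c1
            · exact absurd ⟨w, hw, hr2⟩ c2
          · omega
      rw [if_neg (fun hc => c0 (by simpa [contains_prefix_iff, pvRank_eq0] using hc))]
      rw [if_neg (fun hc => c1 ⟨"2_noResponse", by simpa using hc, (pvRank_eq1 _).mp rfl⟩)]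
      rw [if_neg (fun hc => c2 ⟨"4_noResponse", by simpa using hc, (pvRank_eq2 _).mp rfl⟩)]
      rw [if_pos (by
          obtain ⟨el, hel, hr⟩ := c3
          exact (contains_prefix_iff et _).mpr ⟨el, hel, (pvRank_eq3 el).mpr hr⟩)]
      rw [hm]
      rfl
    by_cases c4 : ∃ el ∈ et, pvRank el = 4
    · have hm : pvBest et 6 = 4 := by
        obtain ⟨el, hel, hr⟩ := c4
        have h1 := hle el hel
        rcases hatt with h6 | ⟨w, hw, hwr⟩
        · omega
        · have hw6 : pvBest et 6 = pvRank w := hwr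
          rcases Nat.lt_or_ge (pvRank w) 4 with hc | hc
          · interval_cases hr2 : (pvRank w)
            · exact absurd ⟨w, hw, hr2⟩ c0
            · exact absurd ⟨w, hw, hr2⟩ c1
            · exact absurd ⟨w, hw, hr2⟩ c2
            · exact absurd ⟨w, hw, hr2⟩ c3
          · omega
      rw [if_neg (fun hc => c0 (by simpa [contains_prefix_iff, pvRank_eq0] using hc))]
      rw [if_neg (fun hc => c1 ⟨"2_noResponse", by simpa using hc, (pvRank_eq1 _).mp rfl⟩)]
      rw [if_neg (fun hc => c2 ⟨"4_noResponse", by simpa using hc, (pvRank_eq2 _).mp rfl⟩)]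
      rw [if_neg (fun hc => c3 (by simpa [contains_prefix_iff, pvRank_eq3] using hc))]
      rw [if_pos (by
          obtain ⟨el, hel, hr⟩ := c4
          exact (contains_raw_iff et _).mpr ⟨el, hel, (pvRank_eq4 el).mpr hr⟩)]
      rw [hm]
      rfl
    by_cases c5 : ∃ el ∈ et, pvRank el = 5
    · have hm : pvBest et 6 = 5 := by
        obtain ⟨el, hel, hr⟩ := c5
        have h1 := hle el hel
        rcases hatt with h6 | ⟨w, hw, hwr⟩
        · omega
        · have hw6 : pvBest et 6 = pvRank w := hwr
          rcases Nat.lt_or_ge (pvRank w) 5 with hc | hc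
          · interval_cases hr2 : (pvRank w)
            · exact absurd ⟨w, hw, hr2⟩ c0
            · exact absurd ⟨w, hw, hr2⟩ c1
            · exact absurd ⟨w, hw, hr2⟩ c2
            · exact absurd ⟨w, hw, hr2⟩ c3
            · exact absurd ⟨w, hw, hr2⟩ c4
          · omega
      rw [if_neg (fun hc => c0 (by simpa [contains_prefix_iff, pvRank_eq0] using hc))]
      rw [if_neg (fun hc => c1 ⟨"2_noResponse", by simpa using hc, (pvRank_eq1 _).mp rfl⟩)]
      rw [if_neg (fun hc => c2 ⟨"4_noResponse", by simpa using hc, (pvRank_eq2 _).mp rfl⟩)]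
      rw [if_neg (fun hc => c3 (by simpa [contains_prefix_iff, pvRank_eq3] using hc))]
      rw [if_neg (fun hc => c4 ⟨"4", by simpa using hc, (pvRank_eq4 _).mp rfl⟩)]
      rw [if_pos (by
          obtain ⟨el, hel, hr⟩ := c5
          exact (contains_prefix_iff et _).mpr ⟨el, hel, (pvRank_eq5 el).mpr hr⟩)]
      rw [hm]
      rfl
    · have hm : pvBest et 6 = 6 := by
        rcases hatt with h6 | ⟨w, hw, hwr⟩
        · exact h6
        · rcases Nat.lt_or_ge (pvRank w) 6 with hc | hc
          · interval_cases hr2 : (pvRank w)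
            · exact absurd ⟨w, hw, hr2⟩ c0
            · exact absurd ⟨w, hw, hr2⟩ c1
            · exact absurd ⟨w, hw, hr2⟩ c2
            · exact absurd ⟨w, hw, hr2⟩ c3
            · exact absurd ⟨w, hw, hr2⟩ c4
            · exact absurd ⟨w, hw, hr2⟩ c5
          · omega
      rw [if_neg (fun hc => c0 (by simpa [contains_prefix_iff, pvRank_eq0] using hc))]
      rw [if_neg (fun hc => c1 ⟨"2_noResponse", by simpa using hc, (pvRank_eq1 _).mp rfl⟩)]
      rw [if_neg (fun hc => c2 ⟨"4_noResponse", by simpa using hc, (pvRank_eq2 _).mp rfl⟩)]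
      rw [if_neg (fun hc => c3 (by simpa [contains_prefix_iff, pvRank_eq3] using hc))]
      rw [if_neg (fun hc => c4 ⟨"4", by simpa using hc, (pvRank_eq4 _).mp rfl⟩)]
      rw [if_neg (fun hc => c5 (by simpa [contains_prefix_iff, pvRank_eq5] using hc))]
      rw [hm]
      rfl
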